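-- pv_equiv track=rewrite | github.com/SeongrokKim/python-practice | programmers/카카오 기출/표현 가능한 이진트리.py | solution
-- ===== SOURCE A (Python) =====
-- def solution(numbers):
--     answer = []
--
--     def makeBiNum(num):
--         result = []
--         while num > 0:
--             result.append(str(num%2))
--             num //= 2
--         result.reverse()
--         return ''.join(result)
--
--     def check(num, idx, h):
--         if h == 2:
--             if num[idx] == '1':
--                 return True
--             else:
--                 if num[idx-1] == '0' and num[idx+1] == '0':
--                     return True
--                 else:
--                     return False
--         else:
--             if num[idx] == '1':
--                 return check(num, idx - (2**(h-2)), h-1) and check(num, idx + (2**(h-2)), h-1)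
--             else:
--                 if num[idx - (2**(h-2))] == '1' or num[idx + (2**(h-2))] == '1':
--                     return False
--                 else:
--                     return check(num, idx - (2**(h-2)), h-1) and check(num, idx + (2**(h-2)), h-1)
--
--     def checkPossibleToTree(num):
--         numLen = len(num)
--         h = 1
--         while numLen > 2**h -1:
--             h += 1
--         if h == 1:
--             return True
--         numOfNode = 2**h - 1
--         numList = list(num)
--         numList.reverse()
--         for _ in range(numOfNode-numLen):
--             numList.append("0")
--         numList.reverse()
--         num = ''.join(numList)
--         if check(num, numOfNode//2, h):
--             return True
--         else:
--             return False
--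
--     for number in numbers:
--         biNum = makeBiNum(number)
--         if checkPossibleToTree(biNum):
--             answer.append(1)
--         else:
--             answer.append(0)
--     return answer
-- ===== SOURCE B (Python) =====
-- def solution(numbers):
--     def bits(n):
--         # most-significant-first binary digits of n (empty for n <= 0)
--         return bits(n // 2) + str(n % 2) if n > 0 else ''
--
--     res = []
--     for n in numbers:
--         s = bits(n)
--         m = 1
--         while m < len(s):
--             m = 2 * m + 1
--         s = '0' * (m - len(s)) + s
--         # in the in-order layout of a perfect tree of size m, a string encodes
--         # a valid tree iff every non-root '1' has a '1' at its parent index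
--         ok = True
--         for i in range(m):
--             if i == m // 2 or s[i] == '0':
--                 continue
--             j, k = i + 1, 1
--             while j % 2 == 0:
--                 j //= 2
--                 k *= 2
--             p = i + k if j % 4 == 1 else i - k
--             if s[p] == '0':
--                 ok = False
--                 break
--         res.append(1 if ok else 0)
--     return res
-- ===== Notes on version B (the rewrite author's own statement) =====
-- stated objective: simpler
-- what changed: A's recursive divide-and-conquer check (descending the tree with 2**(h-2) offsets and explicit direct-child probes) is replaced by a non-recursive single linear scan: in the in-order layout a string encodes a valid tree iff every non-root '1' has a '1' at its parent index, which is computed locally by stripping the trailing binary zeros of i+1.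
import Mathlib
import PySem

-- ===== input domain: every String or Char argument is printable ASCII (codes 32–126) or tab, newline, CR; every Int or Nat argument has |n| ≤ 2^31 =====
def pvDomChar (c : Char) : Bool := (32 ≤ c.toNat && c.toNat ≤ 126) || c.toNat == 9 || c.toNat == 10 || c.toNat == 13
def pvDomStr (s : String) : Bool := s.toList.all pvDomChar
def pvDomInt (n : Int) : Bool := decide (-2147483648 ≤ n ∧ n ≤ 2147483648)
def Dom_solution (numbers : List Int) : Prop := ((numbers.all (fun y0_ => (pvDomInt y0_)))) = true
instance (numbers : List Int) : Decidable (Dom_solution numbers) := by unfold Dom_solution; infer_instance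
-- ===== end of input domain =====

-- B replaces A's index-arithmetic divide-and-conquer check by a single linear
-- scan verifying that every non-root '1' has a '1' at its parent index
-- (computed by stripping trailing binary zeros): simpler, no recursion over the tree.


-- ===== PORT A =====
-- strings are represented as List Char throughout (PySem.Chars side)

-- the while-loop of makeBiNum: result.append(str(num % 2)); num //= 2
def mbLoop (num : Int) (result : List (List Char)) : List (List Char) :=
  if h : 0 < num then
    mbLoop (PySem.Int.floordiv num 2) (result ++ [PySem.Int.toChars (PySem.Int.mod num 2)])
  else result
termination_by num.toNat
decreasing_by
  rw [PySem.Int.floordiv_eq_ediv_of_pos (by norm_num)]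
  omega

def makeBiNum (num : Int) : List Char := ((mbLoop num []).reverse).flatten

-- check(num, idx, h); Python tests h == 2, and check is only ever invoked with
-- h ≥ 2, where `h ≤ 2` is the identical test (it makes the recursion terminate)
def check (num : List Char) (idx : Int) (h : Nat) : Bool :=
  if h ≤ 2 then
    if PySem.List.pyGet? num idx == some '1' then true
    else
      if PySem.List.pyGet? num (idx - 1) == some '0' &&
         PySem.List.pyGet? num (idx + 1) == some '0' then true else false
  else
    if PySem.List.pyGet? num idx == some '1' then
      check num (idx - ((2 ^ (h - 2) : Nat) : Int)) (h - 1) &&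
      check num (idx + ((2 ^ (h - 2) : Nat) : Int)) (h - 1)
    else
      if PySem.List.pyGet? num (idx - ((2 ^ (h - 2) : Nat) : Int)) == some '1' ||
         PySem.List.pyGet? num (idx + ((2 ^ (h - 2) : Nat) : Int)) == some '1' then false
      else
        check num (idx - ((2 ^ (h - 2) : Nat) : Int)) (h - 1) &&
        check num (idx + ((2 ^ (h - 2) : Nat) : Int)) (h - 1)
termination_by h
decreasing_by all_goals omega

-- h = 1; while numLen > 2**h - 1: h += 1
def findH (numLen : Nat) (h : Nat) : Nat :=
  if 2 ^ h - 1 < numLen then findH numLen (h + 1) else h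
termination_by numLen + 1 - h
decreasing_by
  have := Nat.lt_two_pow_self (n := h)
  omega

def checkPossibleToTree (num : List Char) : Bool :=
  let numLen := num.length
  let h := findH numLen 1
  if h = 1 then true
  else
    let numOfNode := 2 ^ h - 1
    -- reverse, append "0" (numOfNode - numLen) times, reverse, join
    let padded := (num.reverse ++ List.replicate (numOfNode - numLen) '0').reverse
    if check padded (PySem.Int.floordiv (numOfNode : Int) 2) h then true else false

def solution (numbers : List Int) : List Int :=
  numbers.foldl
    (fun answer number =>
      answer ++ [if checkPossibleToTree (makeBiNum number) then (1 : Int) else 0]) []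

-- ===== PORT B =====
-- bits(n) = bits(n // 2) + str(n % 2) if n > 0 else ''
def altBits (n : Int) : List Char :=
  if h : 0 < n then altBits (PySem.Int.floordiv n 2) ++ PySem.Int.toChars (PySem.Int.mod n 2)
  else []
termination_by n.toNat
decreasing_by
  rw [PySem.Int.floordiv_eq_ediv_of_pos (by norm_num)]
  omega

-- full = 1; while full < len(s): full = 2*full + 1
def altFull (L full : Nat) : Nat :=
  if full < L then altFull L (2 * full + 1) else full
termination_by L - full

-- while j % 2 == 0: j //= 2; k *= 2   (Python's loop; the 0 < j guard only
-- makes the function total — Python diverges at j = 0, which is never reached)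
def stripTwos (j k : Nat) : Nat × Nat :=
  if h : j % 2 = 0 ∧ 0 < j then stripTwos (j / 2) (2 * k) else (j, k)
termination_by j
decreasing_by omega

-- p = i + k if j % 4 == 1 else i - k
def altParentIdx (i : Nat) : Int :=
  let jk := stripTwos (i + 1) 1
  if jk.1 % 4 = 1 then (i : Int) + jk.2 else (i : Int) - jk.2

-- the linear scan: every non-root '1' must have a '1' at its parent index
def altValid (n : Int) : Bool :=
  let s := altBits n
  let m := altFull s.length 1
  let P := List.replicate (m - s.length) '0' ++ s
  (List.range m).all fun i =>
    decide (i = m / 2) || (PySem.List.pyGet? P (i : Int) == some '0') ||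
      !(PySem.List.pyGet? P (altParentIdx i) == some '0')

def solution_alt (numbers : List Int) : List Int :=
  numbers.map (fun n => if altValid n then (1 : Int) else 0)

-- ===== PRECONDITION & SPEC =====
def Spec_solution (numbers : List Int) (out : List Int) : Prop := out = solution_alt numbers
instance (numbers : List Int) (out : List Int) : Decidable (Spec_solution numbers out) := by unfold Spec_solution; infer_instance

-- ===== CLAIM (what is proved, stated in full; the proofs are below) =====
def Claim_equal_solution : Prop := ∀ (numbers : List Int), Dom_solution numbers → Spec_solution numbers (solution numbers)

-- ===== LEMMAS AND PROOFS =====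

lemma mbLoop_key : ∀ (k : Nat) (num : Int), num.toNat = k →
    ∀ res, mbLoop num res = res ++ mbLoop num [] := by
  intro k
  induction k using Nat.strong_induction_on with
  | _ k IH =>
    intro num hk res
    conv_lhs => rw [mbLoop]
    conv_rhs => rw [mbLoop]
    by_cases h : 0 < num
    · have hlt : (PySem.Int.floordiv num 2).toNat < k := by
        rw [PySem.Int.floordiv_eq_ediv_of_pos (by norm_num)]; omega
      simp only [dif_pos h]
      rw [IH _ hlt _ rfl, IH _ hlt _ rfl ([] ++ [_])]
      simp
    · simp [dif_neg h]

lemma mbLoop_acc (num : Int) (res : List (List Char)) :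
    mbLoop num res = res ++ mbLoop num [] :=
  mbLoop_key num.toNat num rfl res

lemma makeBiNum_key : ∀ (k : Nat) (num : Int), num.toNat = k →
    makeBiNum num = altBits num := by
  intro k
  induction k using Nat.strong_induction_on with
  | _ k IH =>
    intro num hk
    unfold makeBiNum
    rw [mbLoop, altBits]
    by_cases h : 0 < num
    · have hlt : (PySem.Int.floordiv num 2).toNat < k := by
        rw [PySem.Int.floordiv_eq_ediv_of_pos (by norm_num)]; omega
      have IH' : (mbLoop (PySem.Int.floordiv num 2) []).reverse.flatten
          = altBits (PySem.Int.floordiv num 2) := IH _ hlt _ rfl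
      simp only [dif_pos h]
      rw [mbLoop_acc]
      simp only [List.nil_append, List.reverse_append, List.flatten_append,
        List.reverse_cons, List.reverse_nil, List.flatten_cons, List.flatten_nil,
        List.append_nil]
      rw [IH']
    · simp [dif_neg h]

lemma makeBiNum_eq (num : Int) : makeBiNum num = altBits num :=
  makeBiNum_key num.toNat num rfl

lemma altBits_binary_key : ∀ (k : Nat) (n : Int), n.toNat = k →
    ∀ c ∈ altBits n, c = '0' ∨ c = '1' := by
  intro k
  induction k using Nat.strong_induction_on with
  | _ k IH =>
    intro n hk c hc
    rw [altBits] at hc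
    by_cases h : 0 < n
    · have hlt : (PySem.Int.floordiv n 2).toNat < k := by
        rw [PySem.Int.floordiv_eq_ediv_of_pos (by norm_num)]; omega
      simp only [dif_pos h, List.mem_append] at hc
      rcases hc with hc | hc
      · exact IH _ hlt _ rfl c hc
      · have hm : PySem.Int.mod n 2 = 0 ∨ PySem.Int.mod n 2 = 1 := by
          have h1 := PySem.Int.mod_nonneg n (b := 2) (by norm_num)
          have h2 := PySem.Int.mod_lt n (b := 2) (by norm_num)
          omega
        rcases hm with hm | hm <;> rw [hm] at hc
        · left
          have h0 : PySem.Int.toChars (0 : Int) = ['0'] := by decide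
          rw [h0] at hc; simpa using hc
        · right
          have h1 : PySem.Int.toChars (1 : Int) = ['1'] := by decide
          rw [h1] at hc; simpa using hc
    · simp [dif_neg h] at hc

lemma altBits_binary (n : Int) : ∀ c ∈ altBits n, c = '0' ∨ c = '1' :=
  altBits_binary_key n.toNat n rfl

lemma findH_le (L h : Nat) : L ≤ 2 ^ (findH L h) - 1 := by
  fun_induction findH L h with
  | case1 h hg IH => exact IH
  | case2 h hg => omega

lemma findH_ge (L h : Nat) : h ≤ findH L h := by
  fun_induction findH L h with
  | case1 h hg IH => omega
  | case2 h hg => omega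

lemma altFull_eq (L h : Nat) : altFull L (2 ^ h - 1) = 2 ^ (findH L h) - 1 := by
  fun_induction findH L h with
  | case1 h hg IH =>
    have hp : 1 ≤ 2 ^ h := Nat.one_le_two_pow
    have hstep : 2 * (2 ^ h - 1) + 1 = 2 ^ (h + 1) - 1 := by
      rw [pow_succ]; omega
    rw [altFull, if_pos hg, hstep]
    exact IH
  | case2 h hg =>
    rw [altFull, if_neg hg]

-- per-index condition of B's scan (without the root skip)
def entryB (P : List Char) (i : Nat) : Bool :=
  (PySem.List.pyGet? P (i : Int) == some '0') ||
    !(PySem.List.pyGet? P (altParentIdx i) == some '0')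

lemma pyGetNat (P : List Char) (i : Nat) (hi : i < P.length) :
    PySem.List.pyGet? P ((i : Nat) : Int) = some P[i] := by
  rw [PySem.List.pyGet?_natCast, List.getElem?_eq_getElem hi]

lemma stripTwos_eq (k q c : Nat) (hq : q % 2 = 1) :
    stripTwos (2 ^ k * q) c = (q, 2 ^ k * c) := by
  induction k generalizing c with
  | zero =>
    rw [stripTwos]
    simp [hq]
  | succ k IH =>
    rw [stripTwos]
    have hqpos : 0 < q := by omega
    have hpos : 0 < 2 ^ (k + 1) * q := by positivity
    have hsplit : 2 ^ (k + 1) * q = 2 * (2 ^ k * q) := by ring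
    have heven : 2 ^ (k + 1) * q % 2 = 0 := by
      rw [hsplit]; exact Nat.mul_mod_right 2 _
    rw [dif_pos ⟨heven, hpos⟩]
    have hdiv : 2 ^ (k + 1) * q / 2 = 2 ^ k * q := by
      rw [hsplit]; exact Nat.mul_div_cancel_left _ (by norm_num)
    rw [hdiv, IH]
    have he : 2 ^ k * (2 * c) = 2 ^ (k + 1) * c := by ring
    rw [he]

lemma altParentIdx_eq (k q : Nat) (hq : q % 2 = 1) (i : Nat) (hi : i + 1 = 2 ^ k * q) :
    altParentIdx i = if q % 4 = 1 then (i : Int) + 2 ^ k else (i : Int) - 2 ^ k := by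
  unfold altParentIdx
  rw [hi, stripTwos_eq k q 1 hq]
  simp

-- A's recursive check, characterised as B's scan condition over the subtree segment
lemma check_iff : ∀ (h : Nat), 2 ≤ h → ∀ (P : List Char) (p : Nat), 2 ^ h ∣ p →
    p + (2 ^ h - 1) ≤ P.length → (∀ c ∈ P, c = '0' ∨ c = '1') →
    (check P ((p + (2 ^ (h - 1) - 1) : Nat) : Int) h = true ↔
      ∀ r < 2 ^ h - 1, r ≠ 2 ^ (h - 1) - 1 → entryB P (p + r) = true) := by
  intro h hh
  induction h, hh using Nat.le_induction with
  | base =>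
    intro P p hdvd hlen hbin
    obtain ⟨t, ht⟩ := hdvd
    norm_num at ht hlen
    have h0 : p < P.length := by omega
    have h1 : p + 1 < P.length := by omega
    have h2 : p + 2 < P.length := by omega
    have ha := hbin (P[p]'h0) (List.getElem_mem h0)
    have hb := hbin (P[p + 1]'h1) (List.getElem_mem h1)
    have hc := hbin (P[p + 2]'h2) (List.getElem_mem h2)
    have hpar0 : altParentIdx p = ((p + 1 : Nat) : Int) := by
      rw [altParentIdx_eq 0 (p + 1) (by omega) p (by ring)]
      rw [if_pos (by omega)]
      push_cast; ring
    have hpar2 : altParentIdx (p + 2) = ((p + 1 : Nat) : Int) := by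
      rw [altParentIdx_eq 0 (p + 3) (by omega) (p + 2) (by ring)]
      rw [if_neg (by omega)]
      push_cast; ring
    have e : (2 : Nat) ^ (2 - 1) - 1 = 1 := by norm_num
    rw [check, if_pos (by norm_num : (2 : Nat) ≤ 2), e]
    have c1 : ((p + 1 : Nat) : Int) - 1 = ((p : Nat) : Int) := by push_cast; ring
    have c2 : ((p + 1 : Nat) : Int) + 1 = ((p + 2 : Nat) : Int) := by push_cast; ring
    rw [c1, c2, pyGetNat P (p + 1) h1, pyGetNat P p h0, pyGetNat P (p + 2) h2]
    have hrhs : (∀ r < 2 ^ 2 - 1, r ≠ 1 → entryB P (p + r) = true) ↔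
        (entryB P p = true ∧ entryB P (p + 2) = true) := by
      constructor
      · intro hAll
        refine ⟨?_, hAll 2 (by norm_num) (by norm_num)⟩
        have := hAll 0 (by norm_num) (by norm_num)
        simpa using this
      · rintro ⟨hA, hC⟩ r hr hne
        norm_num at hr hne
        interval_cases r
        · simpa using hA
        · exact absurd rfl hne
        · exact hC
    rw [hrhs]
    unfold entryB
    rw [hpar0, hpar2, pyGetNat P (p + 1) h1, pyGetNat P p h0, pyGetNat P (p + 2) h2]
    rcases ha with ha | ha <;> rcases hb with hb | hb <;> rcases hc with hc | hc <;>
      simp [ha, hb, hc]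
  | succ h hh IH =>
    intro P p hdvd hlen hbin
    have hp1 : 1 ≤ (2 : Nat) ^ (h - 1) := Nat.one_le_two_pow
    have hp2 : (2 : Nat) ^ h = 2 * 2 ^ (h - 1) := by
      conv_lhs => rw [show h = h - 1 + 1 by omega]
      rw [pow_succ]; ring
    have hp3 : (2 : Nat) ^ (h + 1) = 2 * 2 ^ h := by rw [pow_succ]; ring
    have h4 : (2 : Nat) ^ (h + 1) = 4 * 2 ^ (h - 1) := by
      rw [show h + 1 = (h - 1) + 2 by omega, pow_add]; ring
    obtain ⟨t, ht⟩ := hdvd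
    have hcast : ((2 : Int) ^ (h - 1)) = ((2 ^ (h - 1) : Nat) : Int) := by push_cast; ring
    -- the three node indices of the root level
    have hrootlt : p + (2 ^ h - 1) < P.length := by omega
    have hLlt : p + (2 ^ (h - 1) - 1) < P.length := by omega
    have hRlt : (p + 2 ^ h) + (2 ^ (h - 1) - 1) < P.length := by omega
    have hmidbin := hbin (P[p + (2 ^ h - 1)]'hrootlt) (List.getElem_mem hrootlt)
    have hlcbin := hbin (P[p + (2 ^ (h - 1) - 1)]'hLlt) (List.getElem_mem hLlt)
    have hrcbin := hbin (P[(p + 2 ^ h) + (2 ^ (h - 1) - 1)]'hRlt) (List.getElem_mem hRlt)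
    -- parent pointers of the two direct children go to the root
    have hparL : altParentIdx (p + (2 ^ (h - 1) - 1)) = ((p + (2 ^ h - 1) : Nat) : Int) := by
      rw [altParentIdx_eq (h - 1) (4 * t + 1) (by omega) _ (by
        rw [ht, h4, add_assoc, Nat.sub_add_cancel hp1]; ring)]
      rw [if_pos (by omega), hcast]
      omega
    have hparR : altParentIdx ((p + 2 ^ h) + (2 ^ (h - 1) - 1))
        = ((p + (2 ^ h - 1) : Nat) : Int) := by
      rw [altParentIdx_eq (h - 1) (4 * t + 3) (by omega) _ (by
        rw [ht, h4, add_assoc, add_assoc, Nat.sub_add_cancel hp1, hp2]; ring)]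
      rw [if_neg (by omega), hcast]
      omega
    -- unfold one level of check
    rw [check, if_neg (by omega : ¬(h + 1 ≤ 2))]
    simp only [show h + 1 - 2 = h - 1 from by omega, show h + 1 - 1 = h from by omega]
    have eL : ((p + (2 ^ h - 1) : Nat) : Int) - ((2 ^ (h - 1) : Nat) : Int)
        = ((p + (2 ^ (h - 1) - 1) : Nat) : Int) := by omega
    have eR : ((p + (2 ^ h - 1) : Nat) : Int) + ((2 ^ (h - 1) : Nat) : Int)
        = (((p + 2 ^ h) + (2 ^ (h - 1) - 1) : Nat) : Int) := by omega
    rw [eL, eR, pyGetNat P _ hrootlt, pyGetNat P _ hLlt, pyGetNat P _ hRlt]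
    have ihL := IH P p ⟨2 * t, by rw [ht, hp3]; ring⟩ (by omega) hbin
    have ihR := IH P (p + 2 ^ h) ⟨2 * t + 1, by rw [ht, hp3]; ring⟩ (by omega) hbin
    -- splitting the scan range of the whole subtree into root entry and halves
    have hsplit : (∀ r < 2 ^ (h + 1) - 1, r ≠ 2 ^ h - 1 → entryB P (p + r) = true) ↔
        ((∀ r < 2 ^ h - 1, r ≠ 2 ^ (h - 1) - 1 → entryB P (p + r) = true) ∧
         entryB P (p + (2 ^ (h - 1) - 1)) = true ∧
         (∀ r < 2 ^ h - 1, r ≠ 2 ^ (h - 1) - 1 → entryB P ((p + 2 ^ h) + r) = true) ∧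
         entryB P ((p + 2 ^ h) + (2 ^ (h - 1) - 1)) = true) := by
      constructor
      · intro hAll
        refine ⟨fun r hr _ => hAll r (by omega) (by omega),
                hAll (2 ^ (h - 1) - 1) (by omega) (by omega), fun r hr _ => ?_, ?_⟩
        · have := hAll (2 ^ h + r) (by omega) (by omega)
          rwa [← add_assoc] at this
        · have := hAll (2 ^ h + (2 ^ (h - 1) - 1)) (by omega) (by omega)
          rwa [← add_assoc] at this
      · rintro ⟨hL, hLC, hR, hRC⟩ r hr hne
        by_cases hcase : r < 2 ^ h - 1
        · by_cases hroot : r = 2 ^ (h - 1) - 1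
          · rw [hroot]; exact hLC
          · exact hL r hcase hroot
        · have hge : 2 ^ h ≤ r := by omega
          have hrw : p + r = (p + 2 ^ h) + (r - 2 ^ h) := by omega
          rw [hrw]
          by_cases hroot : r - 2 ^ h = 2 ^ (h - 1) - 1
          · rw [hroot]; exact hRC
          · exact hR (r - 2 ^ h) (by omega) hroot
    rw [hsplit]
    -- the two child entries, evaluated
    have hEL : entryB P (p + (2 ^ (h - 1) - 1))
        = ((P[p + (2 ^ (h - 1) - 1)]'hLlt == '0')
            || !((P[p + (2 ^ h - 1)]'hrootlt : Char) == '0')) := by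
      unfold entryB
      rw [hparL, pyGetNat P _ hLlt, pyGetNat P _ hrootlt]
      simp
    have hER : entryB P ((p + 2 ^ h) + (2 ^ (h - 1) - 1))
        = ((P[(p + 2 ^ h) + (2 ^ (h - 1) - 1)]'hRlt == '0')
            || !((P[p + (2 ^ h - 1)]'hrootlt : Char) == '0')) := by
      unfold entryB
      rw [hparR, pyGetNat P _ hRlt, pyGetNat P _ hrootlt]
      simp
    rcases hmidbin with hmid | hmid <;> rw [hmid] at hEL hER ⊢
    · -- root is '0': both children must be '0', then recurse
      rw [if_neg (by decide)]
      rcases hlcbin with hlc | hlc <;> rcases hrcbin with hrc | hrc <;>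
        rw [hlc] at hEL ⊢ <;> rw [hrc] at hER ⊢
      · rw [if_neg (by decide), Bool.and_eq_true, ihL, ihR]
        have hEL' : entryB P (p + (2 ^ (h - 1) - 1)) = true := by rw [hEL]; decide
        have hER' : entryB P ((p + 2 ^ h) + (2 ^ (h - 1) - 1)) = true := by rw [hER]; decide
        constructor
        · rintro ⟨x, y⟩; exact ⟨x, hEL', y, hER'⟩
        · rintro ⟨x, _, y, _⟩; exact ⟨x, y⟩
      · rw [if_pos (by decide)]
        have hER' : entryB P ((p + 2 ^ h) + (2 ^ (h - 1) - 1)) = false := by rw [hER]; decide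
        simp [hER']
      · rw [if_pos (by decide)]
        have hEL' : entryB P (p + (2 ^ (h - 1) - 1)) = false := by rw [hEL]; decide
        simp [hEL']
      · rw [if_pos (by decide)]
        have hEL' : entryB P (p + (2 ^ (h - 1) - 1)) = false := by rw [hEL]; decide
        simp [hEL']
    · -- root is '1': just recurse on both subtrees
      rw [if_pos (by decide), Bool.and_eq_true, ihL, ihR]
      have hEL' : entryB P (p + (2 ^ (h - 1) - 1)) = true := by
        rw [hEL]; cases hx : (P[p + (2 ^ (h - 1) - 1)]'hLlt == '0') <;> decide
      have hER' : entryB P ((p + 2 ^ h) + (2 ^ (h - 1) - 1)) = true := by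
        rw [hER]; cases hx : (P[(p + 2 ^ h) + (2 ^ (h - 1) - 1)]'hRlt == '0') <;> decide
      constructor
      · rintro ⟨x, y⟩; exact ⟨x, hEL', y, hER'⟩
      · rintro ⟨x, _, y, _⟩; exact ⟨x, y⟩

lemma per_number (n : Int) : checkPossibleToTree (makeBiNum n) = altValid n := by
  rw [makeBiNum_eq]
  simp only [checkPossibleToTree, altValid]
  set s := altBits n with hs
  set f := findH s.length 1 with hf
  have hfull : altFull s.length 1 = 2 ^ f - 1 := by
    have := altFull_eq s.length 1
    norm_num at this
    exact this
  have hLle : s.length ≤ 2 ^ f - 1 := findH_le s.length 1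
  have hfge : 1 ≤ f := findH_ge s.length 1
  have hsbin : ∀ c ∈ s, c = '0' ∨ c = '1' := hs ▸ altBits_binary n
  clear_value f
  clear_value s
  rw [hfull]
  by_cases h1 : f = 1
  · subst h1
    norm_num
  · rw [if_neg h1]
    have hf2 : 2 ≤ f := by omega
    have hp1 : 1 ≤ (2 : Nat) ^ (f - 1) := Nat.one_le_two_pow
    have hpw : (2 : Nat) ^ f = 2 * 2 ^ (f - 1) := by
      conv_lhs => rw [show f = f - 1 + 1 by omega]
      rw [pow_succ]; ring
    have hpad : (s.reverse ++ List.replicate (2 ^ f - 1 - s.length) '0').reverse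
        = List.replicate (2 ^ f - 1 - s.length) '0' ++ s := by
      rw [List.reverse_append, List.reverse_reverse, List.reverse_replicate]
    rw [hpad]
    set P := List.replicate (2 ^ f - 1 - s.length) '0' ++ s with hP
    have hPlen : P.length = 2 ^ f - 1 := by rw [hP]; simp; omega
    have hPbin : ∀ c ∈ P, c = '0' ∨ c = '1' := by
      intro c hc; rw [hP] at hc; rcases List.mem_append.mp hc with hc | hc
      · left; exact List.eq_of_mem_replicate hc
      · exact hsbin c hc
    have hdiv : PySem.Int.floordiv ((2 ^ f - 1 : Nat) : Int) 2
        = ((2 ^ (f - 1) - 1 : Nat) : Int) := by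
      have hnc := PySem.Int.floordiv_natCast (2 ^ f - 1) 2
      have e : (2 ^ f - 1) / 2 = 2 ^ (f - 1) - 1 := by omega
      rw [e] at hnc
      exact_mod_cast hnc
    have hm2 : (2 ^ f - 1) / 2 = 2 ^ (f - 1) - 1 := by omega
    have hmain := check_iff f hf2 P 0 ⟨0, by ring⟩ (by omega) hPbin
    simp only [Nat.zero_add] at hmain
    rw [hdiv]
    cases hc : check P ((2 ^ (f - 1) - 1 : Nat) : Int) f with
    | true =>
      rw [if_pos rfl]
      have hall := hmain.mp hc
      symm
      rw [List.all_eq_true]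
      intro i hi
      rw [List.mem_range] at hi
      by_cases hroot : i = (2 ^ f - 1) / 2
      · simp [hroot]
      · have hent := hall i hi (by omega)
        unfold entryB at hent
        rw [Bool.or_assoc, hent]
        simp
    | false =>
      rw [if_neg (by simp)]
      symm
      rw [Bool.eq_false_iff]
      intro hall
      rw [List.all_eq_true] at hall
      have : check P ((2 ^ (f - 1) - 1 : Nat) : Int) f = true := by
        rw [hmain]
        intro r hr hne
        have hg := hall r (List.mem_range.mpr hr)
        have hnr : decide (r = (2 ^ f - 1) / 2) = false := by
          simp; omega
        rw [Bool.or_assoc, hnr] at hg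
        unfold entryB
        simpa using hg
      rw [this] at hc
      exact Bool.noConfusion hc

-- ===== VERDICT (by name: the statement is the Claim_ definition above) =====
theorem solution_spec : Claim_equal_solution := by
  intro numbers _
  unfold Spec_solution solution solution_alt
  rw [PySem.List.foldl_append_singleton_eq_map]
  simp [per_number]
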